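-- pv_equiv track=rewrite | github.com/gmlunesa/visualgorithm | Algorithms.py | get_unsortedness
-- ===== SOURCE A (Python) =====
-- def get_unsortedness(data):
--     counter = 0
--     comparisons = 0
--     for index in range(1, len(data)):
--         counter+=1
--         while 0 < index and data[index] < data[index - 1]:
--             counter += 1
--             index -= 1
--
--     return counter
-- ===== SOURCE B (Python) =====
-- def get_unsortedness(data):
--     total = 0
--     run = 0
--     for i in range(1, len(data)):
--         run = run + 1 if data[i] < data[i - 1] else 0
--         total += 1 + run
--     return total
-- ===== Notes on version B (the rewrite author's own statement) =====
-- stated objective: faster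
-- what changed: Replaced A's per-index backwards while-walk over the descent chain by a single pass that maintains the current consecutive-descent run length and accumulates 1+run per index.
import Mathlib
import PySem

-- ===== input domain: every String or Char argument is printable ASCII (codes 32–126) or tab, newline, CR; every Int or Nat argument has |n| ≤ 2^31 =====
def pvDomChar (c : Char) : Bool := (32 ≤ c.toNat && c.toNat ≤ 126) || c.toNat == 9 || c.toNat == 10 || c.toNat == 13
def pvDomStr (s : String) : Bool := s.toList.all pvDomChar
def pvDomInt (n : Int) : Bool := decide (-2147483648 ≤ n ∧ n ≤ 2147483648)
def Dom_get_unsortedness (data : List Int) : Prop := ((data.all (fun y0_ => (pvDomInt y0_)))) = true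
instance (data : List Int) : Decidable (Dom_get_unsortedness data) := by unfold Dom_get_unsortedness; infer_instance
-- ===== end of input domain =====

-- B replaces A's quadratic per-index backwards descent walk by one pass keeping the
-- current consecutive-descent run length (objective: faster, asymptotic O(n^2) -> O(n)).


-- ===== PORT A =====
-- inner 'while 0 < index and data[index] < data[index-1]: counter += 1; index -= 1'
-- (index is always in range 0..len-1, so data[index] never raises; pyGetD is exact here)
def pvInnerA (data : List Int) : Nat → Int → Int
  | 0, counter => counter
  | i + 1, counter =>
      if PySem.List.pyGetD data ((i : Int) + 1) 0 < PySem.List.pyGetD data (i : Int) 0 then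
        pvInnerA data i (counter + 1)
      else counter

def get_unsortedness (data : List Int) : Int :=
  (PySem.List.pyRange 1 data.length 1).foldl
    (fun counter index => pvInnerA data index.toNat (counter + 1)) 0

-- ===== PORT B =====
def get_unsortedness_alt (data : List Int) : Int :=
  ((PySem.List.pyRange 1 data.length 1).foldl
    (fun (st : Int × Int) i =>
      let run := if PySem.List.pyGetD data i 0 < PySem.List.pyGetD data (i - 1) 0 then st.1 + 1 else 0
      (run, st.2 + (1 + run))) (0, 0)).2

-- ===== PRECONDITION & SPEC =====
def Spec_get_unsortedness (data : List Int) (out : Int) : Prop := out = get_unsortedness_alt data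
instance (data : List Int) (out : Int) : Decidable (Spec_get_unsortedness data out) := by unfold Spec_get_unsortedness; infer_instance

-- ===== CLAIM (what is proved, stated in full; the proofs are below) =====
def Claim_equal_get_unsortedness : Prop := ∀ (data : List Int), Dom_get_unsortedness data → Spec_get_unsortedness data (get_unsortedness data)

-- ===== LEMMAS AND PROOFS =====

-- length of the consecutive-descent chain ending at index i
def pvRun (data : List Int) : Nat → Int
  | 0 => 0
  | i + 1 =>
      if PySem.List.pyGetD data ((i : Int) + 1) 0 < PySem.List.pyGetD data (i : Int) 0 then
        pvRun data i + 1
      else 0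

theorem pvInnerA_eq (data : List Int) : ∀ (i : Nat) (c : Int),
    pvInnerA data i c = c + pvRun data i := by
  intro i
  induction i with
  | zero => intro c; simp [pvInnerA, pvRun]
  | succ n ih =>
      intro c
      simp only [pvInnerA, pvRun]
      split
      · rw [ih]; ring
      · ring

theorem pv_fold_eq (data : List Int) : ∀ (n : Nat),
    (((PySem.List.pyRange 1 (n : Int) 1).foldl
        (fun (st : Int × Int) i =>
          let run := if PySem.List.pyGetD data i 0 < PySem.List.pyGetD data (i - 1) 0 then st.1 + 1 else 0
          (run, st.2 + (1 + run))) (0, 0)).1 = pvRun data (n - 1)) ∧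
    (((PySem.List.pyRange 1 (n : Int) 1).foldl
        (fun (st : Int × Int) i =>
          let run := if PySem.List.pyGetD data i 0 < PySem.List.pyGetD data (i - 1) 0 then st.1 + 1 else 0
          (run, st.2 + (1 + run))) (0, 0)).2 =
      (PySem.List.pyRange 1 (n : Int) 1).foldl
        (fun counter index => pvInnerA data index.toNat (counter + 1)) 0) := by
  intro n
  induction n with
  | zero => simp [PySem.List.pyRange_one_eq_nil, pvRun]
  | succ m ih =>
      rcases Nat.eq_zero_or_pos m with hm | hm
      · subst hm
        simp [PySem.List.pyRange_one_eq_nil, pvRun]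
      · obtain ⟨m', rfl⟩ : ∃ m', m = m' + 1 := ⟨m - 1, by omega⟩
        have hsplit : PySem.List.pyRange 1 (((m' + 1 : Nat) : Int) + 1) 1
            = PySem.List.pyRange 1 ((m' + 1 : Nat) : Int) 1 ++ [((m' + 1 : Nat) : Int)] := by
          exact PySem.List.pyRange_one_succ_right (by push_cast; omega)
        obtain ⟨ih1, ih2⟩ := ih
        have hcast : (((m' + 1 : Nat) : Int) + 1) = ((m' + 1 + 1 : Nat) : Int) := by push_cast; ring
        have hc1 : ((m' + 1 : Nat) : Int) = (m' : Int) + 1 := by push_cast; ring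
        have hc2 : ((m' : Int) + 1 - 1) = (m' : Int) := by ring
        have hn1 : (m' + 1 - 1 : Nat) = m' := by omega
        have hn2 : (m' + 1 + 1 - 1 : Nat) = m' + 1 := by omega
        constructor
        · rw [← hcast, hsplit, List.foldl_append]
          simp only [List.foldl_cons, List.foldl_nil]
          rw [hn2, ih1, hn1, hc1, hc2]
          simp only [pvRun]
        · rw [← hcast, hsplit, List.foldl_append, List.foldl_append]
          simp only [List.foldl_cons, List.foldl_nil]
          rw [ih1, ih2, hn1]
          have htoNat : (((m' + 1 : Nat) : Int)).toNat = m' + 1 := Int.toNat_natCast _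
          rw [htoNat, pvInnerA_eq, hc1, hc2]
          simp only [pvRun]
          split <;> ring

-- ===== VERDICT (by name: the statement is the Claim_ definition above) =====
theorem get_unsortedness_spec : Claim_equal_get_unsortedness := by
  intro data _
  unfold Spec_get_unsortedness get_unsortedness get_unsortedness_alt
  exact ((pv_fold_eq data data.length).2).symm
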